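-- pv_equiv track=rewrite | github.com/devnuller/edu-cpu | assembler.py | generate_srec
-- ===== SOURCE A (Python) =====
-- def generate_srec(output):
--     """Generate Motorola S-record format from the output dict (addr -> byte)."""
--     lines = []
--     # S0 header record (optional, contains "EDU-CPU" as data)
--     header_data = list(b"EDU-CPU")
--     s0_count = 2 + 1 + len(header_data)  # addr(2) + data + checksum
--     s0_bytes = [s0_count, 0x00, 0x00] + header_data
--     s0_checksum = (~sum(s0_bytes)) & 0xFF
--     lines.append("S0" + "".join(f"{b:02X}" for b in s0_bytes)
--                   + f"{s0_checksum:02X}")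
--
--     if output:
--         # S1 data records (16-bit address)
--         addrs = sorted(output.keys())
--         i = 0
--         while i < len(addrs):
--             base = addrs[i]
--             data = []
--             while (i < len(addrs) and addrs[i] == base + len(data)
--                    and len(data) < 16):
--                 data.append(output[addrs[i]])
--                 i += 1
--             # byte count = addr(2) + data + checksum(1)
--             count = 2 + len(data) + 1
--             addr_hi = (base >> 8) & 0xFF
--             addr_lo = base & 0xFF
--             rec_bytes = [count, addr_hi, addr_lo] + data
--             checksum = (~sum(rec_bytes)) & 0xFF
--             lines.append("S1" + "".join(f"{b:02X}" for b in rec_bytes)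
--                           + f"{checksum:02X}")
--
--     # S9 end record (start address 0x0000)
--     s9_bytes = [0x03, 0x00, 0x00]
--     s9_checksum = (~sum(s9_bytes)) & 0xFF
--     lines.append("S9" + "".join(f"{b:02X}" for b in s9_bytes)
--                   + f"{s9_checksum:02X}")
--     return "\n".join(lines) + "\n"
-- ===== SOURCE B (Python) =====
-- def generate_srec(output):
--     """Generate Motorola S-record format from the output dict (addr -> byte)."""
--     def record(typ, body):
--         chk = (~sum(body)) & 0xFF
--         return typ + "".join(format(b, "02X") for b in body + [chk])
--
--     lines = [record("S0", [10, 0x00, 0x00] + list(b"EDU-CPU"))]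
--     # phase 1: group the sorted addresses into maximal contiguous runs
--     runs = []
--     for a in sorted(output.keys()):
--         if runs and a == runs[-1][0] + len(runs[-1][1]):
--             runs[-1][1].append(output[a])
--         else:
--             runs.append((a, [output[a]]))
--     # phase 2: split each run into 16-byte chunks, one S1 record per chunk
--     for base, data in runs:
--         for off in range(0, len(data), 16):
--             chunk = data[off:off + 16]
--             lines.append(record("S1", [len(chunk) + 3,
--                                        (base + off >> 8) & 0xFF,
--                                        (base + off) & 0xFF] + chunk))
--     lines.append(record("S9", [0x03, 0x00, 0x00]))
--     return "\n".join(lines) + "\n"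
-- ===== Notes on version B (the rewrite author's own statement) =====
-- stated objective: idiomatic
-- what changed: A's single nested while-loop that greedily collects up to 16 bytes per record is replaced by two separate phases: first group sorted addresses into maximal contiguous runs, then split each run into 16-byte chunks via range/slicing, emitting one record per chunk; record formatting (count/addr/data/checksum) is factored into one helper used for S0, S1 and S9.
import Mathlib
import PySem

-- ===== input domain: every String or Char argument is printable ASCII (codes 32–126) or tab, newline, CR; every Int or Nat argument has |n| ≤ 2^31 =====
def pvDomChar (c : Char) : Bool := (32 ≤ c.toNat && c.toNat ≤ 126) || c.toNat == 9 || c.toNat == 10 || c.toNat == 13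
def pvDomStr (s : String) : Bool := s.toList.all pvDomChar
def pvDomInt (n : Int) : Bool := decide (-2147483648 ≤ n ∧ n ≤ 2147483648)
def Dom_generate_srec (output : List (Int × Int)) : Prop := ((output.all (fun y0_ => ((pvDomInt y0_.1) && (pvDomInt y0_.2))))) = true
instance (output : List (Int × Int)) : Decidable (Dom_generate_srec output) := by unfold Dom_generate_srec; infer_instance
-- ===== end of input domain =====

-- B restructures A's nested greedy while-loop into two phases (group sorted addresses
-- into maximal contiguous runs, then cut each run into 16-byte chunks); same output, no speed claim.

-- Shared formatting helper: Python's format(b, '02X') (f"{b:02X}"), used identically by both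
-- Pythons.  Exact: uppercase hex of |b|, zero-padded to total width 2 including the sign.
def pvHexUpper (n : Nat) : List Char := (Nat.toDigits 16 n).map PySem.Chars.upperChar

def pvHex02 (b : Int) : List Char :=
  if b < 0 then '-' :: pvHexUpper b.natAbs
  else List.replicate (2 - (pvHexUpper b.toNat).length) '0' ++ pvHexUpper b.toNat

-- "".join(f"{b:02X}" for b in bs)
def pvJoinHex (bs : List Int) : List Char := (bs.map pvHex02).flatten

-- ===== PORT A =====

-- the body of A's outer while-loop's record construction
def pvRecA (base : Int) (data : List Int) : String :=
  let count : Int := 2 + (data.length : Int) + 1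
  let addr_hi : Int := PySem.Int.band (base >>> 8) 255
  let addr_lo : Int := PySem.Int.band base 255
  let rec_bytes : List Int := [count, addr_hi, addr_lo] ++ data
  let checksum : Int := PySem.Int.band (Int.not rec_bytes.sum) 255
  String.ofList ('S' :: '1' :: (pvJoinHex rec_bytes ++ pvHex02 checksum))

-- A's inner while loop: collect while addrs[i] == base + len(data) and len(data) < 16.
-- output[addrs[i]] is ported as getD _ 0: the key is always present (it came from keys()).
def pvAgather (d : PySem.Dict Int Int) (base : Int) : List Int → List Int → List Int × List Int
  | data, [] => (data, [])
  | data, a :: rest =>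
    if a = base + (data.length : Int) ∧ data.length < 16 then
      pvAgather d base (data ++ [d.getD a 0]) rest
    else (data, a :: rest)

theorem pvAgather_snd_le (d : PySem.Dict Int Int) (base : Int) :
    ∀ (l data : List Int), (pvAgather d base data l).2.length ≤ l.length := by
  intro l
  induction l with
  | nil => intro data; simp [pvAgather]
  | cons a rest ih =>
    intro data
    simp only [pvAgather]
    split
    · exact le_trans (ih _) (by simp)
    · simp

-- A's outer while loop over the remaining sorted addresses
def pvAloop (d : PySem.Dict Int Int) : List Int → List String
  | [] => []
  | a :: rest =>
    pvRecA a (pvAgather d a [] (a :: rest)).1 :: pvAloop d (pvAgather d a [] (a :: rest)).2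
termination_by l => l.length
decreasing_by
  simp only [pvAgather, List.length_nil, Int.natCast_zero, add_zero, List.length_cons]
  exact Nat.lt_succ_of_le (pvAgather_snd_le _ _ _ _)

def pvS0lineA : String :=
  let header_data : List Int := [69, 68, 85, 45, 67, 80, 85]
  let s0_count : Int := 2 + 1 + (header_data.length : Int)
  let s0_bytes : List Int := [s0_count, 0, 0] ++ header_data
  let s0_checksum : Int := PySem.Int.band (Int.not s0_bytes.sum) 255
  String.ofList ('S' :: '0' :: (pvJoinHex s0_bytes ++ pvHex02 s0_checksum))

def pvS9lineA : String :=
  let s9_bytes : List Int := [3, 0, 0]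
  let s9_checksum : Int := PySem.Int.band (Int.not s9_bytes.sum) 255
  String.ofList ('S' :: '9' :: (pvJoinHex s9_bytes ++ pvHex02 s9_checksum))

def generate_srec (output : List (Int × Int)) : String :=
  let d := PySem.Dict.ofList output
  let addrs := PySem.List.sorted d.keys (fun x => x) false
  let lines : List String :=
    pvS0lineA :: ((if d.items.isEmpty then [] else pvAloop d addrs) ++ [pvS9lineA])
  PySem.Str.join "\n" lines ++ "\n"

-- ===== PORT B =====

-- B's record helper: typ + hex of (body + [checksum])
def pvBrecord (typ : String) (body : List Int) : String :=
  let chk : Int := PySem.Int.band (Int.not body.sum) 255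
  String.ofList (typ.toList ++ pvJoinHex (body ++ [chk]))

-- B's run-building loop step (runs kept in reverse order; Python appends to runs[-1])
def pvRunsStep (d : PySem.Dict Int Int) (runs : List (Int × List Int)) (a : Int) :
    List (Int × List Int) :=
  match runs with
  | (b, dat) :: rest =>
    if a = b + (dat.length : Int) then (b, dat ++ [d.getD a 0]) :: rest
    else (a, [d.getD a 0]) :: (b, dat) :: rest
  | [] => [(a, [d.getD a 0])]

-- B's inner chunk loop: for off in range(0, len(data), 16)
def pvChunkLines (b : Int) (dat : List Int) : List String :=
  (PySem.List.pyRange 0 (dat.length : Int) 16).map (fun off =>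
    let chunk := PySem.List.slice dat (some off) (some (off + 16))
    pvBrecord "S1"
      ([(chunk.length : Int) + 3, PySem.Int.band ((b + off) >>> 8) 255,
        PySem.Int.band (b + off) 255] ++ chunk))

def generate_srec_alt (output : List (Int × Int)) : String :=
  let d := PySem.Dict.ofList output
  let runs := ((PySem.List.sorted d.keys (fun x => x) false).foldl (pvRunsStep d) []).reverse
  let lines : List String :=
    pvBrecord "S0" ([10, 0, 0] ++ [69, 68, 85, 45, 67, 80, 85]) ::
      (runs.flatMap (fun p => pvChunkLines p.1 p.2) ++ [pvBrecord "S9" [3, 0, 0]])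
  PySem.Str.join "\n" lines ++ "\n"

-- ===== PRECONDITION & SPEC =====
def Spec_generate_srec (output : List (Int × Int)) (out : String) : Prop := out = generate_srec_alt output
instance (output : List (Int × Int)) (out : String) : Decidable (Spec_generate_srec output out) := by unfold Spec_generate_srec; infer_instance

-- ===== CLAIM (what is proved, stated in full; the proofs are below) =====
def Claim_equal_generate_srec : Prop := ∀ (output : List (Int × Int)), Dom_generate_srec output → Spec_generate_srec output (generate_srec output)


-- ===== LEMMAS AND PROOFS =====

-- Proof-side helper: the maximal contiguous "run taker" — consume values while the next
-- address is exactly the expected one (t), with no 16-byte cap.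
def pvTk (d : PySem.Dict Int Int) (t : Int) : List Int → List Int × List Int
  | [] => ([], [])
  | a :: rest =>
    if a = t then ((d.getD a 0) :: (pvTk d (t + 1) rest).1, (pvTk d (t + 1) rest).2)
    else ([], a :: rest)

theorem pvTk_snd_le (d : PySem.Dict Int Int) :
    ∀ (l : List Int) (t : Int), (pvTk d t l).2.length ≤ l.length := by
  intro l
  induction l with
  | nil => intro t; simp [pvTk]
  | cons a rest ih =>
    intro t
    simp only [pvTk]
    split
    · simpa using Nat.le_succ_of_le (ih (t + 1))
    · simp

theorem pvTk_drop (d : PySem.Dict Int Int) :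
    ∀ (j : Nat) (l : List Int) (t : Int), j ≤ (pvTk d t l).1.length →
      pvTk d (t + (j : Int)) (l.drop j) = ((pvTk d t l).1.drop j, (pvTk d t l).2) := by
  intro j
  induction j with
  | zero => intro l t _; simp
  | succ j ih =>
    intro l t h
    match l with
    | [] => simp [pvTk] at h
    | a :: rest =>
      by_cases ha : a = t
      · have e1 : pvTk d t (a :: rest) =
            ((d.getD a 0) :: (pvTk d (t + 1) rest).1, (pvTk d (t + 1) rest).2) := by
          simp [pvTk, ha]
        rw [e1] at h ⊢
        have h' : j ≤ (pvTk d (t + 1) rest).1.length := by simpa using h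
        have e2 : t + ((j + 1 : Nat) : Int) = (t + 1) + (j : Int) := by push_cast; ring
        rw [List.drop_succ_cons, e2, ih rest (t + 1) h']
        simp
      · simp [pvTk, ha] at h

-- A's capped inner loop, characterised by the uncapped run taker.
theorem pvAgather_eq (d : PySem.Dict Int Int) (b : Int) :
    ∀ (l data : List Int),
      pvAgather d b data l =
        if data.length + (pvTk d (b + (data.length : Int)) l).1.length ≤ 16 then
          (data ++ (pvTk d (b + (data.length : Int)) l).1,
           (pvTk d (b + (data.length : Int)) l).2)
        else
          (data ++ (pvTk d (b + (data.length : Int)) l).1.take (16 - data.length),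
           l.drop (16 - data.length)) := by
  intro l
  induction l with
  | nil =>
    intro data
    by_cases hle : data.length ≤ 16 <;> simp [pvAgather, pvTk, hle]
  | cons a rest ih =>
    intro data
    by_cases hc : a = b + (data.length : Int) ∧ data.length < 16
    · have step : pvAgather d b data (a :: rest) = pvAgather d b (data ++ [d.getD a 0]) rest := by
        simp only [pvAgather, if_pos hc]
      have htk : pvTk d (b + (data.length : Int)) (a :: rest) =
          ((d.getD a 0) :: (pvTk d (b + (data.length : Int) + 1) rest).1,
           (pvTk d (b + (data.length : Int) + 1) rest).2) := by
        simp [pvTk, hc.1]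
      have ecast : b + (((data ++ [d.getD a 0]).length : Nat) : Int) = b + (data.length : Int) + 1 := by
        simp only [List.length_append, List.length_cons, List.length_nil]
        push_cast
        ring
      rw [step, ih, htk, ecast]
      simp only [List.length_append, List.length_cons, List.length_nil, Nat.zero_add]
      by_cases h2 : data.length + 1 + (pvTk d (b + (data.length : Int) + 1) rest).1.length ≤ 16
      · rw [if_pos h2, if_pos (by omega)]
        simp
      · rw [if_neg h2, if_neg (by omega)]
        have e3 : 16 - data.length = (16 - (data.length + 1)) + 1 := by omega
        rw [e3, List.take_succ_cons, List.drop_succ_cons]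
        simp
    · have step : pvAgather d b data (a :: rest) = (data, a :: rest) := by
        simp only [pvAgather, if_neg hc]
      rw [step]
      by_cases heq : a = b + (data.length : Int)
      · have h16 : 16 ≤ data.length := by
          rcases Nat.lt_or_ge data.length 16 with h | h
          · exact absurd ⟨heq, h⟩ hc
          · exact h
        have htk : pvTk d (b + (data.length : Int)) (a :: rest) =
            ((d.getD a 0) :: (pvTk d (b + (data.length : Int) + 1) rest).1,
             (pvTk d (b + (data.length : Int) + 1) rest).2) := by
          simp [pvTk, heq]
        rw [htk, if_neg (by simp only [List.length_cons]; omega)]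
        have e0 : 16 - data.length = 0 := by omega
        simp [e0]
      · have htk : pvTk d (b + (data.length : Int)) (a :: rest) = ([], a :: rest) := by
          simp [pvTk, heq]
        rw [htk]
        by_cases hle : data.length ≤ 16
        · rw [if_pos (by simpa using hle)]
          simp
        · rw [if_neg (by simpa using hle)]
          have e0 : 16 - data.length = 0 := by omega
          simp [e0]

-- B's chunk loop, recast as a straightforward recursion on the run's data.
def pvChunksR (b : Int) (dat : List Int) : List String :=
  if h : dat = [] then [] else
    pvBrecord "S1"
      ([((dat.take 16).length : Int) + 3, PySem.Int.band (b >>> 8) 255,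
        PySem.Int.band b 255] ++ dat.take 16) :: pvChunksR (b + 16) (dat.drop 16)
termination_by dat.length
decreasing_by
  have : 0 < dat.length := List.length_pos_of_ne_nil h
  simp only [List.length_drop]
  omega

theorem pvChunkLines_eq_aux :
    ∀ (n : Nat) (dat : List Int), dat.length ≤ n → ∀ (b : Int),
      pvChunkLines b dat = pvChunksR b dat := by
  have hslice : ∀ (xs : List Int) (j : Nat),
      PySem.List.slice xs (some ((j : Int))) (some ((j : Int) + 16)) = (xs.drop j).take 16 := by
    intro xs j
    have := PySem.List.slice_natCast_add (xs := xs) (j := j) (n := 16)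
    simpa using this
  intro n
  induction n with
  | zero =>
    intro dat h b
    have hd : dat = [] := List.eq_nil_of_length_eq_zero (by omega)
    subst hd
    simp [pvChunkLines, pvChunksR, PySem.List.pyRange_of_pos 0 0 (by norm_num : (0:Int) < 16)]
  | succ n ih =>
    intro dat h b
    rcases eq_or_ne dat [] with rfl | hne
    · simp [pvChunkLines, pvChunksR, PySem.List.pyRange_of_pos 0 0 (by norm_num : (0:Int) < 16)]
    · have hpos : 0 < dat.length := List.length_pos_of_ne_nil hne
      rw [pvChunksR, dif_neg hne]
      simp only [pvChunkLines]
      rw [PySem.List.pyRange_of_pos 0 (dat.length : Int) (by norm_num : (0:Int) < 16)]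
      rw [if_pos (by exact_mod_cast hpos)]
      have hm : (((dat.length : Int) - 0 + 16 - 1) / 16).toNat
          = ((((dat.drop 16).length : Int) - 0 + 16 - 1) / 16).toNat + 1 := by
        simp only [List.length_drop]
        omega
      rw [hm, List.range_succ_eq_map]
      simp only [List.map_cons, List.map_map]
      congr 1
      · have h16 : PySem.List.slice dat none (some (16:Int)) = dat.take 16 := by
          simpa using PySem.List.slice_to (xs := dat) (b := (16:Int)) (by norm_num)
        simp [h16, List.length_take]
      · rw [← ih (dat.drop 16) (by simp only [List.length_drop]; omega) (b + 16)]
        simp only [pvChunkLines]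
        rw [PySem.List.pyRange_of_pos 0 ((dat.drop 16).length : Int) (by norm_num : (0:Int) < 16)]
        by_cases hp : 0 < (dat.drop 16).length
        · rw [if_pos (by exact_mod_cast hp)]
          rw [List.map_map]
          apply List.map_congr_left
          intro k _
          simp only [Function.comp_apply]
          have e1 : (0:Int) + 16 * ((k + 1 : Nat) : Int) = ((16 + 16 * k : Nat) : Int) := by
            push_cast; ring
          have e2 : (0:Int) + 16 * ((k : Nat) : Int) = ((16 * k : Nat) : Int) := by
            push_cast; ring
          have e5 : ((Nat.succ k : Nat) : Int) = ((k + 1 : Nat) : Int) := by norm_num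
          rw [e5, e1, e2, hslice dat (16 + 16 * k), hslice (dat.drop 16) (16 * k)]
          rw [List.drop_drop]
          have e4 : b + ((16 + 16 * k : Nat) : Int) = b + 16 + ((16 * k : Nat) : Int) := by
            push_cast; ring
          rw [e4]
        · rw [if_neg (by exact_mod_cast hp)]
          have hz : (dat.drop 16).length = 0 := by omega
          norm_num [hz]


-- B's fold touches only the head of the accumulator; older runs are carried through.
theorem pvFoldl_runsStep_acc (d : PySem.Dict Int Int) :
    ∀ (l : List Int) (b : Int) (dat : List Int) (rest : List (Int × List Int)),
      List.foldl (pvRunsStep d) ((b, dat) :: rest) l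
        = List.foldl (pvRunsStep d) [(b, dat)] l ++ rest := by
  intro l
  induction l with
  | nil => intros; simp
  | cons a t ih =>
    intro b dat rest
    simp only [List.foldl_cons]
    by_cases hb : a = b + (dat.length : Int)
    · simp only [pvRunsStep, if_pos hb]
      exact ih ..
    · simp only [pvRunsStep, if_neg hb]
      rw [ih a [d.getD a 0] ((b, dat) :: rest), ih a [d.getD a 0] [(b, dat)]]
      simp

-- B's fold on a single open run, characterised by the run taker.
theorem pvFoldl_runsStep_tk (d : PySem.Dict Int Int) :
    ∀ (l : List Int) (b : Int) (dat : List Int),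
      List.foldl (pvRunsStep d) [(b, dat)] l
        = List.foldl (pvRunsStep d) [] (pvTk d (b + (dat.length : Int)) l).2 ++
            [(b, dat ++ (pvTk d (b + (dat.length : Int)) l).1)] := by
  intro l
  induction l with
  | nil => intro b dat; simp [pvTk]
  | cons a t ih =>
    intro b dat
    by_cases hb : a = b + (dat.length : Int)
    · have h1 : List.foldl (pvRunsStep d) [(b, dat)] (a :: t)
          = List.foldl (pvRunsStep d) [(b, dat ++ [d.getD a 0])] t := by
        simp only [List.foldl_cons, pvRunsStep, if_pos hb]
      have htk : pvTk d (b + (dat.length : Int)) (a :: t)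
          = ((d.getD a 0) :: (pvTk d (b + (dat.length : Int) + 1) t).1,
             (pvTk d (b + (dat.length : Int) + 1) t).2) := by
        simp [pvTk, hb]
      have ecast : b + (((dat ++ [d.getD a 0]).length : Nat) : Int) = b + (dat.length : Int) + 1 := by
        simp only [List.length_append, List.length_cons, List.length_nil]
        push_cast
        ring
      rw [h1, ih, ecast, htk]
      simp
    · have h1 : List.foldl (pvRunsStep d) [(b, dat)] (a :: t)
          = List.foldl (pvRunsStep d) ((a, [d.getD a 0]) :: [(b, dat)]) t := by
        simp only [List.foldl_cons, pvRunsStep, if_neg hb]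
      have htk : pvTk d (b + (dat.length : Int)) (a :: t) = ([], a :: t) := by
        simp [pvTk, hb]
      have h2 : List.foldl (pvRunsStep d) [] (a :: t)
          = List.foldl (pvRunsStep d) [(a, [d.getD a 0])] t := by
        simp [List.foldl_cons, pvRunsStep]
      rw [h1, pvFoldl_runsStep_acc, htk, h2]
      simp

-- B's run list in forward order
def pvRunsB (d : PySem.Dict Int Int) (l : List Int) : List (Int × List Int) :=
  (List.foldl (pvRunsStep d) [] l).reverse

theorem pvRunsB_cons (d : PySem.Dict Int Int) (a : Int) (rest : List Int) :
    pvRunsB d (a :: rest)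
      = (a, d.getD a 0 :: (pvTk d (a + 1) rest).1) :: pvRunsB d (pvTk d (a + 1) rest).2 := by
  unfold pvRunsB
  have h0 : List.foldl (pvRunsStep d) [] (a :: rest)
      = List.foldl (pvRunsStep d) [(a, [d.getD a 0])] rest := by
    simp [List.foldl_cons, pvRunsStep]
  have ecast : a + (([d.getD a 0].length : Nat) : Int) = a + 1 := by simp
  rw [h0, pvFoldl_runsStep_tk, ecast]
  simp

-- A's record string equals B's record string for the same base and chunk.
theorem pvRecA_eq (a : Int) (dat : List Int) :
    pvRecA a dat = pvBrecord "S1"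
      ([(dat.length : Int) + 3, PySem.Int.band (a >>> 8) 255, PySem.Int.band a 255] ++ dat) := by
  unfold pvRecA pvBrecord pvJoinHex
  have hc : (2 : Int) + (dat.length : Int) + 1 = (dat.length : Int) + 3 := by ring
  rw [hc]
  simp [List.map_append, List.flatten_append]

-- MAIN: A's greedy capped loop = B's runs-then-chunks, for ANY address list.
theorem pvAloop_eq_aux (d : PySem.Dict Int Int) :
    ∀ (n : Nat) (l : List Int), l.length ≤ n →
      pvAloop d l = (pvRunsB d l).flatMap (fun p => pvChunksR p.1 p.2) := by
  intro n
  induction n with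
  | zero =>
    intro l h
    have : l = [] := List.eq_nil_of_length_eq_zero (by omega)
    subst this
    simp [pvAloop, pvRunsB]
  | succ n ih =>
    intro l h
    match l with
    | [] => simp [pvAloop, pvRunsB]
    | a :: rest =>
      have hrest : rest.length ≤ n := by simpa using h
      simp only [pvAloop]
      rw [pvAgather_eq]
      have htk0 : pvTk d (a + ((List.length ([] : List Int) : Nat) : Int)) (a :: rest)
          = ((d.getD a 0) :: (pvTk d (a + 1) rest).1, (pvTk d (a + 1) rest).2) := by
        have : a + ((List.length ([] : List Int) : Nat) : Int) = a := by simp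
        rw [this]
        have : pvTk d a (a :: rest)
            = ((d.getD a 0) :: (pvTk d (a + 1) rest).1, (pvTk d (a + 1) rest).2) := by
          simp [pvTk]
        exact this
      rw [htk0]
      rw [pvRunsB_cons, List.flatMap_cons]
      by_cases hle : (List.length ([] : List Int)) + ((d.getD a 0) :: (pvTk d (a + 1) rest).1).length ≤ 16
      · rw [if_pos hle]
        have hlen : ((d.getD a 0) :: (pvTk d (a + 1) rest).1).length ≤ 16 := by simpa using hle
        have hch : pvChunksR a ((d.getD a 0) :: (pvTk d (a + 1) rest).1)
            = [pvBrecord "S1"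
                ([((((d.getD a 0) :: (pvTk d (a + 1) rest).1)).length : Int) + 3,
                  PySem.Int.band (a >>> 8) 255, PySem.Int.band a 255] ++
                  ((d.getD a 0) :: (pvTk d (a + 1) rest).1))] := by
          rw [pvChunksR, dif_neg (by simp)]
          rw [List.take_of_length_le hlen, List.drop_eq_nil_of_le hlen]
          rw [pvChunksR]
          simp
        rw [hch]
        have htail := ih (pvTk d (a + 1) rest).2 (le_trans (pvTk_snd_le d rest (a + 1)) hrest)
        rw [List.nil_append, htail, pvRecA_eq]
        simp
      · rw [if_neg hle]
        have hgt : 16 < ((d.getD a 0) :: (pvTk d (a + 1) rest).1).length := by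
          simp only [List.length_nil, Nat.zero_add] at hle
          omega
        have h15 : 15 ≤ (pvTk d (a + 1) rest).1.length := by
          simp only [List.length_cons] at hgt
          omega
        have hdrop := pvTk_drop d 15 rest (a + 1) h15
        have e16 : a + 1 + ((15 : Nat) : Int) = a + 16 := by push_cast; ring
        rw [e16] at hdrop
        have hlenF : 16 ≤ (pvTk d (a + 1) rest).1.length := by
          simp only [List.length_cons] at hgt
          omega
        have hlen15 : 0 < ((pvTk d (a + 1) rest).1.drop 15).length := by
          rw [List.length_drop]
          omega
        -- the remainder after the 16-byte cap starts a new run at a + 16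
        match h15d : rest.drop 15 with
        | [] =>
          exfalso
          rw [h15d] at hdrop
          have : (pvTk d (a + 16) ([] : List Int)).1 = (pvTk d (a + 1) rest).1.drop 15 :=
            congrArg Prod.fst hdrop
          simp [pvTk] at this
          omega
        | a' :: t' =>
          rw [h15d] at hdrop
          by_cases ha' : a' = a + 16
          · have htk' : pvTk d (a + 16) (a' :: t')
                = ((d.getD a' 0) :: (pvTk d (a + 16 + 1) t').1, (pvTk d (a + 16 + 1) t').2) := by
              simp [pvTk, ha']
            rw [htk'] at hdrop
            rw [Prod.mk.injEq] at hdrop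
            obtain ⟨hfst, hsnd⟩ := hdrop
            -- A's tail: aloop on the rest of the input, = chunks of the continuation run
            have htail : pvAloop d (a' :: t')
                = pvChunksR (a + 16) ((pvTk d (a + 1) rest).1.drop 15) ++
                    (pvRunsB d (pvTk d (a + 1) rest).2).flatMap (fun p => pvChunksR p.1 p.2) := by
              rw [ih (a' :: t') (by
                have hdl : (rest.drop 15).length = rest.length - 15 := List.length_drop ..
                rw [h15d] at hdl
                omega)]
              rw [pvRunsB_cons, List.flatMap_cons]
              dsimp only
              have ea : a' + 1 = a + 16 + 1 := by rw [ha']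
              rw [ea, hsnd, hfst, ha']
            -- B's head run: chunk it once
            have hch : pvChunksR a ((d.getD a 0) :: (pvTk d (a + 1) rest).1)
                = pvBrecord "S1"
                    ([((((d.getD a 0) :: (pvTk d (a + 1) rest).1).take 16).length : Int) + 3,
                      PySem.Int.band (a >>> 8) 255, PySem.Int.band a 255] ++
                      ((d.getD a 0) :: (pvTk d (a + 1) rest).1).take 16) ::
                    pvChunksR (a + 16) ((pvTk d (a + 1) rest).1.drop 15) := by
              rw [pvChunksR, dif_neg (by simp)]
              rfl
            rw [hch]
            dsimp only
            simp only [List.nil_append, List.length_nil, Nat.sub_zero]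
            rw [htail, pvRecA_eq]
            simp
          · exfalso
            have hfst : (pvTk d (a + 16) (a' :: t')).1 = (pvTk d (a + 1) rest).1.drop 15 :=
              congrArg Prod.fst hdrop
            simp only [pvTk, if_neg ha'] at hfst
            rw [← hfst] at hlen15
            simp at hlen15

-- total-input versions
theorem pvAloop_eq (d : PySem.Dict Int Int) (l : List Int) :
    pvAloop d l = (pvRunsB d l).flatMap (fun p => pvChunksR p.1 p.2) :=
  pvAloop_eq_aux d l.length l le_rfl

theorem pvChunkLines_eq (b : Int) (dat : List Int) : pvChunkLines b dat = pvChunksR b dat :=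
  pvChunkLines_eq_aux dat.length dat le_rfl b


-- ===== VERDICT (by name: the statement is the Claim_ definition above) =====
theorem generate_srec_spec : Claim_equal_generate_srec := by
  unfold Claim_equal_generate_srec Spec_generate_srec
  intro output _
  simp only [generate_srec, generate_srec_alt]
  have hs0 : pvS0lineA = pvBrecord "S0" ([10, 0, 0] ++ [69, 68, 85, 45, 67, 80, 85]) := by decide
  have hs9 : pvS9lineA = pvBrecord "S9" [3, 0, 0] := by decide
  by_cases hemp : (PySem.Dict.ofList output).items.isEmpty
  · have hkeys : (PySem.Dict.ofList output).keys = [] := by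
      simp [PySem.Dict.keys, List.isEmpty_iff.mp hemp]
    rw [hkeys]
    rw [(PySem.List.sorted_eq_nil_iff _ _ _).mpr rfl]
    simp [hemp, hs0, hs9]
  · rw [if_neg (by simpa using hemp)]
    rw [pvAloop_eq]
    have hfun : (fun p : Int × List Int => pvChunkLines p.1 p.2)
        = fun p : Int × List Int => pvChunksR p.1 p.2 := by
      funext p
      exact pvChunkLines_eq p.1 p.2
    rw [hfun, hs0, hs9]
    rfl
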